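-- pv_equiv track=rewrite | github.com/Aasthaengg/IBMdataset | Python_codes/p03827/s133362107.py | maximumx
-- ===== SOURCE A (Python) =====
-- def maximumx(N, S) :
--   x = 0
--   max = 0
--
--   for i in range(N) :
--     if S[i] == 'I' :
--       x += 1
--       if max < x :
--         max = x
--     else :
--       x -= 1
--
--   return max
-- ===== SOURCE B (Python) =====
-- def maximumx(N, S):
--     # best = maximum prefix sum (including the empty prefix) of the remaining suffix,
--     # computed right-to-left via the recurrence best = max(0, delta + best).
--     best = 0
--     for c in reversed(S[:max(N, 0)]):
--         best = max(0, (1 if c == 'I' else -1) + best)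
--     return best
-- ===== Notes on version B (the rewrite author's own statement) =====
-- stated objective: alternative
-- what changed: Replaces A's left-to-right scan maintaining a running sum plus a running maximum by a right-to-left Kadane-style pass over the reversed prefix with the single suffix recurrence best = max(0, delta + best), which never computes any prefix sum.
import Mathlib
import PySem

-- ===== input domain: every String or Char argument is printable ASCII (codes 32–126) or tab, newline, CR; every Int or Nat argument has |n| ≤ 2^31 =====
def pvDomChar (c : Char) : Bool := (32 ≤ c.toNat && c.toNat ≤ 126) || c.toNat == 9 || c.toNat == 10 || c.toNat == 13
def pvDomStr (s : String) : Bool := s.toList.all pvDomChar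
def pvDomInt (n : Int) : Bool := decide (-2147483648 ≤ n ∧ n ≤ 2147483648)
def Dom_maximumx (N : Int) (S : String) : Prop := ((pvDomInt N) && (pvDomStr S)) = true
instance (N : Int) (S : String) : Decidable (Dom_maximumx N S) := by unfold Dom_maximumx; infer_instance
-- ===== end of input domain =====

-- B replaces A's forward running-sum/running-max scan by a right-to-left Kadane-style pass
-- (best = max 0 (delta + best) over the reversed prefix); alternative decomposition, same cost.

-- ===== PORT A =====
def maximumx (N : Int) (S : String) : Int :=
  ((PySem.List.pyRange 0 N 1).foldl
    (fun (st : Int × Int) i =>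
      if PySem.List.pyGetD S.toList i ' ' == 'I' then
        let x := st.1 + 1
        (x, if st.2 < x then x else st.2)
      else
        (st.1 - 1, st.2))
    (0, 0)).2

-- ===== PORT B =====
def maximumx_alt (N : Int) (S : String) : Int :=
  ((PySem.List.slice S.toList none (some (max N 0))).reverse).foldl
    (fun best c => max 0 ((if c == 'I' then (1 : Int) else -1) + best)) 0

-- ===== PRECONDITION & SPEC =====
-- A raises IndexError when N exceeds len(S); exactly those inputs are excluded.
def Pre_maximumx (N : Int) (S : String) : Prop := N ≤ (S.toList.length : Int)
instance (N : Int) (S : String) : Decidable (Pre_maximumx N S) := by unfold Pre_maximumx; infer_instance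
def pvWitness_maximumx : Int × String := (4, "IDII")

def Spec_maximumx (N : Int) (S : String) (out : Int) : Prop := out = maximumx_alt N S
instance (N : Int) (S : String) (out : Int) : Decidable (Spec_maximumx N S out) := by unfold Spec_maximumx; infer_instance

-- ===== CLAIM (what is proved, stated in full; the proofs are below) =====
def Claim_equal_maximumx : Prop := ∀ (N : Int) (S : String), Dom_maximumx N S → Pre_maximumx N S → Spec_maximumx N S (maximumx N S)

-- ===== LEMMAS AND PROOFS =====

-- per-character delta, and the list of running prefix sums starting from a (exclusive of a)
def pvDelta (c : Char) : Int := if c == 'I' then 1 else -1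

def pvSums (a : Int) : List Char → List Int
  | [] => []
  | c :: t => (a + pvDelta c) :: pvSums (a + pvDelta c) t

-- B's suffix recurrence: max prefix sum (including the empty prefix) of a character list
def pvBest : List Char → Int
  | [] => 0
  | c :: t => max 0 (pvDelta c + pvBest t)

lemma pvBest_nonneg (l : List Char) : 0 ≤ pvBest l := by
  cases l with
  | nil => simp [pvBest]
  | cons c t => simp [pvBest]

-- A's loop, as a fold over the characters it actually reads
lemma pvA_char (l : List Char) : ∀ (x m : Int), x ≤ m →
    (l.foldl (fun (st : Int × Int) c =>
      if c == 'I' then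
        let x := st.1 + 1
        (x, if st.2 < x then x else st.2)
      else (st.1 - 1, st.2)) (x, m)).2
    = (pvSums x l).foldl max m := by
  induction l with
  | nil => intro x m _; simp [pvSums]
  | cons c t ih =>
    intro x m hxm
    by_cases hc : c == 'I'
    · have hd : pvDelta c = 1 := by simp [pvDelta, hc]
      simp only [List.foldl_cons, if_pos hc, pvSums, hd]
      rw [ih (x + 1) _ (by split_ifs <;> omega)]
      congr 1
      split_ifs <;> omega
    · have hd : pvDelta c = -1 := by simp [pvDelta, hc]
      simp only [List.foldl_cons, if_neg hc, pvSums, hd]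
      have hx : x + -1 = x - 1 := by ring
      rw [hx, ih (x - 1) m (by omega)]
      congr 1
      omega

-- the running-max of the prefix sums equals the suffix recurrence
lemma pvSums_foldl_max (l : List Char) : ∀ (a m : Int), a ≤ m →
    (pvSums a l).foldl max m = max m (a + pvBest l) := by
  induction l with
  | nil => intro a m h; simp [pvSums, pvBest]; omega
  | cons c t ih =>
    intro a m h
    have ht := pvBest_nonneg t
    simp only [pvSums, List.foldl_cons, pvBest]
    rw [ih (a + pvDelta c) (max m (a + pvDelta c)) (by omega)]
    omega

-- B reduced to the suffix recurrence on the character list it actually reads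
lemma pvAlt_eq (N : Int) (S : String) :
    maximumx_alt N S = pvBest (S.toList.take N.toNat) := by
  unfold maximumx_alt
  have hslice : PySem.List.slice S.toList none (some (max N 0)) = S.toList.take N.toNat := by
    rw [PySem.List.slice_to S.toList (by omega : (0:Int) ≤ max N 0)]
    congr 1
    omega
  rw [hslice, List.foldl_reverse]
  induction S.toList.take N.toNat with
  | nil => simp [pvBest]
  | cons c t ih =>
    simp only [List.foldr_cons, pvBest, ih, pvDelta]

-- A reduced to the same function of that list (under the precondition)
lemma pvA_eq (N : Int) (S : String) (hPre : N ≤ (S.toList.length : Int)) :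
    maximumx N S = pvBest (S.toList.take N.toNat) := by
  unfold maximumx
  by_cases hN : N ≤ 0
  · have h0 : N.toNat = 0 := by omega
    rw [PySem.List.pyRange_one_eq_nil hN, h0]
    simp [pvBest]
  · push_neg at hN
    set l := S.toList.take N.toNat with hl
    have hlen : l.length = N.toNat := by
      rw [hl, List.length_take]; omega
    have hNl : N = (l.length : Int) := by omega
    rw [hNl]
    rw [PySem.List.foldl_congr_mem _ _
      (fun (st : Int × Int) i =>
        if PySem.List.pyGetD l i ' ' == 'I' then
          let x := st.1 + 1
          (x, if st.2 < x then x else st.2)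
        else (st.1 - 1, st.2)) _ ?_]
    · rw [PySem.List.foldl_pyRange_zero_pyGetD' l ' '
        (fun (st : Int × Int) c =>
          if c == 'I' then
            let x := st.1 + 1
            (x, if st.2 < x then x else st.2)
          else (st.1 - 1, st.2)) (0, 0)]
      rw [pvA_char l 0 0 le_rfl, pvSums_foldl_max l 0 0 le_rfl]
      have := pvBest_nonneg l
      omega
    · intro acc i hi
      rw [PySem.List.mem_pyRange_one] at hi
      have h1 : PySem.List.pyGetD S.toList i ' ' = PySem.List.pyGetD l i ' ' := by
        rw [PySem.List.pyGetD_eq_getElem S.toList ' ' hi.1 (by omega),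
            PySem.List.pyGetD_eq_getElem l ' ' hi.1 (by omega)]
        simp [hl]
      rw [h1]

-- ===== VERDICT (by name: the statement is the Claim_ definition above) =====
theorem maximumx_spec : Claim_equal_maximumx := by
  intro N S _ hPre
  unfold Spec_maximumx
  rw [pvA_eq N S hPre, pvAlt_eq]
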